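-- pv_equiv track=rewrite | github.com/ashwon13/Gridworld | RLSetup.py | strEdgesCMD
-- ===== SOURCE A (Python) =====
-- def strEdgesCMD(board,width):
--     newBoard=""
--     board2=board
--     jmps=False
--     if "\n" in board:
--         board2=board[:board.index("\n")]
--         jmps=True
--     for i in range(0,len(board2)):
--         if i%width==0 and i!=0:
--             newBoard+="\n"
--             newBoard+=board2[i]
--         else:
--             newBoard+=board2[i]
--     if jmps==False:
--         return newBoard
--     else:
--         return newBoard+board[board.index("\n"):]
-- ===== SOURCE B (Python) =====
-- def strEdgesCMD(board, width):
--     nl = board.find("\n")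
--     head, tail = (board, "") if nl < 0 else (board[:nl], board[nl:])
--     return "\n".join(head[i:i + width] for i in range(0, len(head), width)) + tail
-- ===== Notes on version B (the rewrite author's own statement) =====
-- stated objective: simpler
-- what changed: A scans the head character by character inserting '\n' when a modulo counter hits a multiple of width; B splits off the head before the first '\n' once, slices it into width-sized chunks with range(0, len(head), width) and joins them with '\n' (one pass of C-level slicing and join instead of per-character Python-level concatenation and modulo). …
-- outside the precondition, e.g. on strEdgesCMD('abcd', -2): A returns 'ab\ncd', B returns ''; on strEdgesCMD('', 0): A returns '', B raises ValueError; on strEdgesCMD('ab', 0): A raises ZeroDivisionError, B raises ValueError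
import Mathlib
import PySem

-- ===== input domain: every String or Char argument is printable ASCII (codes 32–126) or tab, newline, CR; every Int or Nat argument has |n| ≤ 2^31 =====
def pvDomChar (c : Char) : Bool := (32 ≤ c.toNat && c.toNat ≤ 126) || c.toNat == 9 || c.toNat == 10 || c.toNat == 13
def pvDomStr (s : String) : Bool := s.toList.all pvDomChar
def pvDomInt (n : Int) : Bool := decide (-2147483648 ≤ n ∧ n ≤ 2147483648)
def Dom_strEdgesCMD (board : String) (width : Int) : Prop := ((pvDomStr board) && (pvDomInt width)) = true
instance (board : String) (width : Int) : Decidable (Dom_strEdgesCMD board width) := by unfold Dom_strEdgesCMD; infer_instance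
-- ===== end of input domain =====

-- B replaces A's per-character modulo scan by slicing the pre-'\n' head into width-sized
-- chunks and joining them with '\n' (objective: simpler decomposition; not claimed faster).

-- ===== PORT A =====
-- literal transliteration of A: optional truncation at the first '\n', then a character
-- loop over range(len(board2)) inserting '\n' before indices i with i % width == 0, i ≠ 0.
def strEdgesCMD (board : String) (width : Int) : String :=
  let bl := board.toList
  let board2 := bl
  let jmps := false
  let (board2, jmps) :=
    if PySem.Chars.isIn ['\n'] bl then
      (PySem.List.slice bl none (some (PySem.Chars.find bl ['\n'])), true)
    else (board2, jmps)
  let newBoard : List Char :=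
    (PySem.List.pyRange 0 (board2.length : Int) 1).foldl
      (fun acc i =>
        if PySem.Int.mod i width = 0 ∧ i ≠ 0 then
          (acc ++ ['\n']) ++ [PySem.List.pyGetD board2 i ' ']
        else acc ++ [PySem.List.pyGetD board2 i ' '])
      []
  if jmps = false then String.mk newBoard
  else String.mk (newBoard ++ PySem.List.slice bl (some (PySem.Chars.find bl ['\n'])) none)

-- ===== PORT B =====
-- literal transliteration of Source B: split off the head before the first '\n',
-- chunk it with slices head[i:i+width] for i in range(0, len(head), width), join with '\n'.
def strEdgesCMD_alt (board : String) (width : Int) : String :=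
  let bl := board.toList
  let nl := PySem.Chars.find bl ['\n']
  let (head, tail) :=
    if nl < 0 then (bl, ([] : List Char))
    else (PySem.List.slice bl none (some nl), PySem.List.slice bl (some nl) none)
  let chunks := (PySem.List.pyRange 0 (head.length : Int) width).map
    (fun i => PySem.List.slice head (some i) (some (i + width)))
  String.mk (PySem.Chars.join ['\n'] chunks ++ tail)

-- ===== PRECONDITION & SPEC =====
-- Pre_ restricts to width > 0, the natural domain of a board width: at width = 0 A raises
-- ZeroDivisionError on any nonempty head (and returns the board unchanged only because the
-- loop body never runs), and at negative width A's 'i % width == 0' test accidentally splits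
-- at multiples of |width| while B's empty range yields no chunks — neither behaviour is
-- specified, so both are excluded.
def Pre_strEdgesCMD (board : String) (width : Int) : Prop := 0 < width
instance (board : String) (width : Int) : Decidable (Pre_strEdgesCMD board width) := by
  unfold Pre_strEdgesCMD; infer_instance

def pvWitness_strEdgesCMD : String × Int := ("abcde\nXY", 2)

def Spec_strEdgesCMD (board : String) (width : Int) (out : String) : Prop := out = strEdgesCMD_alt board width
instance (board : String) (width : Int) (out : String) : Decidable (Spec_strEdgesCMD board width out) := by unfold Spec_strEdgesCMD; infer_instance

-- ===== CLAIM (what is proved, stated in full; the proofs are below) =====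
def Claim_equal_strEdgesCMD : Prop := ∀ (board : String) (width : Int), Dom_strEdgesCMD board width → Pre_strEdgesCMD board width → Spec_strEdgesCMD board width (strEdgesCMD board width)

-- ===== LEMMAS AND PROOFS =====

-- A's loop, as a structural recursion: p is the absolute index of the first char of s.
def procA (m : Nat) : List Char → Nat → List Char
  | [], _ => []
  | c :: t, p => (if m ∣ p ∧ p ≠ 0 then ['\n', c] else [c]) ++ procA m t (p + 1)

-- the width-sized chunks of s, front to back
def chunksRec (m : Nat) (hm : 0 < m) (s : List Char) : List (List Char) :=
  if h : s = [] then [] else s.take m :: chunksRec m hm (s.drop m)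
termination_by s.length
decreasing_by
  simp only [List.length_drop]
  have : s.length ≠ 0 := fun h0 => h (List.eq_nil_of_length_eq_zero h0)
  omega

theorem procA_append (m : Nat) (a b : List Char) (p : Nat) :
    procA m (a ++ b) p = procA m a p ++ procA m b (p + a.length) := by
  induction a generalizing p with
  | nil => simp [procA]
  | cons c t ih =>
      simp only [List.cons_append, procA, ih, List.length_cons, List.append_assoc]
      ring_nf

theorem procA_no_break (m : Nat) (a : List Char) (p : Nat)
    (h : ∀ j, j < a.length → ¬(m ∣ (p + j) ∧ p + j ≠ 0)) : procA m a p = a := by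
  induction a generalizing p with
  | nil => simp [procA]
  | cons c t ih =>
      have h0 : ¬(m ∣ p ∧ p ≠ 0) := fun hc => h 0 (by simp) (by simpa using hc)
      rw [procA, if_neg h0, ih (p + 1) (fun j hj => by
        have := h (j + 1) (by simpa using Nat.succ_lt_succ hj)
        simpa [Nat.add_assoc, Nat.add_comm 1 j] using this)]
      simp

theorem procA_chunk_pos (m : Nat) (hm : 0 < m) (a : List Char) (q : Nat) (hq : 0 < q)
    (hlen : a.length ≤ m) (hne : a ≠ []) : procA m a (q * m) = '\n' :: a := by
  obtain ⟨c, t, rfl⟩ : ∃ c t, a = c :: t := by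
    cases a with
    | nil => exact absurd rfl hne
    | cons c t => exact ⟨c, t, rfl⟩
  have hdvd : m ∣ q * m := dvd_mul_left m q
  have hqm : q * m ≠ 0 := by positivity
  rw [procA, if_pos ⟨hdvd, hqm⟩, procA_no_break m t (q * m + 1) (fun j hj hcon => by
    obtain ⟨hd, -⟩ := hcon
    have hd' : m ∣ (j + 1) := (Nat.dvd_add_right hdvd).mp (by
      have : q * m + 1 + j = q * m + (j + 1) := by omega
      rwa [this] at hd)
    have hle := Nat.le_of_dvd (by omega) hd'
    have : t.length + 1 ≤ m := by simpa using hlen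
    omega)]
  simp

theorem procA_chunk_zero (m : Nat) (a : List Char) (hlen : a.length ≤ m) :
    procA m a 0 = a := by
  apply procA_no_break
  intro j hj hcon
  obtain ⟨hd, hne⟩ := hcon
  simp only [Nat.zero_add] at hd hne
  exact hne (Nat.eq_zero_of_dvd_of_lt hd (by omega))

theorem procA_chunks (m : Nat) (hm : 0 < m) :
    ∀ n (s : List Char), s.length ≤ n → ∀ q, 0 < q →
      procA m s (q * m) = ((chunksRec m hm s).map ('\n' :: ·)).flatten := by
  intro n
  induction n with
  | zero =>
      intro s hs q hq
      have : s = [] := List.eq_nil_of_length_eq_zero (Nat.le_zero.mp hs)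
      subst this
      rw [chunksRec]
      simp [procA]
  | succ n ih =>
      intro s hs q hq
      by_cases hnil : s = []
      · subst hnil; rw [chunksRec]; simp [procA]
      · rw [chunksRec, dif_neg hnil]
        have hlen0 : 0 < s.length := List.length_pos_iff.mpr hnil
        have htk : s.take m ≠ [] := by
          have hlt : (s.take m).length ≠ 0 := by rw [List.length_take]; omega
          exact fun h => hlt (by rw [h]; rfl)
        have htkl : (s.take m).length ≤ m := by
          rw [List.length_take]; omega
        have step : procA m s (q * m)
            = procA m (s.take m) (q * m) ++ procA m (s.drop m) (q * m + (s.take m).length) := by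
          conv_lhs => rw [← List.take_append_drop m s]
          rw [procA_append]
        rw [step, procA_chunk_pos m hm _ q hq htkl htk]
        by_cases hsm : s.length ≤ m
        · have hd : s.drop m = [] := List.drop_eq_nil_of_le hsm
          rw [hd, chunksRec]
          simp [procA]
        · push_neg at hsm
          have htl : (s.take m).length = m := by rw [List.length_take]; omega
          rw [htl, show q * m + m = (q + 1) * m by ring,
            ih (s.drop m) (by rw [List.length_drop]; omega) (q + 1) (by omega)]
          simp

theorem join_newline_eq_flatten (a : List Char) (l : List (List Char)) :
    PySem.Chars.join ['\n'] (a :: l) = a ++ (l.map ('\n' :: ·)).flatten := by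
  induction l generalizing a with
  | nil => simp [PySem.Chars.join_singleton]
  | cons b rest ih =>
      rw [PySem.Chars.join_cons_cons, ih]
      simp

theorem procA_zero_eq_join (m : Nat) (hm : 0 < m) (s : List Char) :
    procA m s 0 = PySem.Chars.join ['\n'] (chunksRec m hm s) := by
  by_cases hnil : s = []
  · subst hnil; rw [chunksRec]; simp [procA, PySem.Chars.join_nil]
  · rw [chunksRec, dif_neg hnil, join_newline_eq_flatten]
    have hlen0 : 0 < s.length := List.length_pos_iff.mpr hnil
    have htkl : (s.take m).length ≤ m := by rw [List.length_take]; omega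
    have step : procA m s 0
        = procA m (s.take m) 0 ++ procA m (s.drop m) (0 + (s.take m).length) := by
      conv_lhs => rw [← List.take_append_drop m s]
      rw [procA_append]
    rw [step, procA_chunk_zero m _ htkl, Nat.zero_add]
    by_cases hsm : s.length ≤ m
    · have hd : s.drop m = [] := List.drop_eq_nil_of_le hsm
      rw [hd, chunksRec]
      simp [procA]
    · push_neg at hsm
      have htl : (s.take m).length = m := by rw [List.length_take]; omega
      have hrec := procA_chunks m hm (s.drop m).length (s.drop m) le_rfl 1 one_pos
      rw [one_mul] at hrec
      rw [htl, hrec]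

-- A's foldl over range(len s) equals procA at start position 0
theorem loopA_eq_procA (s : List Char) (width : Int) (hw : width ≠ 0) :
    (PySem.List.pyRange 0 (s.length : Int) 1).foldl
      (fun acc i =>
        if PySem.Int.mod i width = 0 ∧ i ≠ 0 then
          (acc ++ ['\n']) ++ [PySem.List.pyGetD s i ' ']
        else acc ++ [PySem.List.pyGetD s i ' '])
      [] = procA width.natAbs s 0 := by
  have hbody : (fun (acc : List Char) (i : Int) =>
      if PySem.Int.mod i width = 0 ∧ i ≠ 0 then
        (acc ++ ['\n']) ++ [PySem.List.pyGetD s i ' ']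
      else acc ++ [PySem.List.pyGetD s i ' ']) =
      (fun acc i => acc ++
        (if PySem.Int.mod i width = 0 ∧ i ≠ 0 then ['\n', PySem.List.pyGetD s i ' ']
         else [PySem.List.pyGetD s i ' '])) := by
    funext acc i
    split <;> simp
  rw [hbody, PySem.List.foldl_append_eq_flatMap, PySem.List.pyRange_zero_natCast, List.nil_append,
    List.flatMap_map]
  have hcong : ∀ j ∈ List.range s.length,
      (if PySem.Int.mod (j : Int) width = 0 ∧ (j : Int) ≠ 0 then
        ['\n', PySem.List.pyGetD s (j : Int) ' '] else [PySem.List.pyGetD s (j : Int) ' ']) =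
      (if width.natAbs ∣ j ∧ j ≠ 0 then ['\n', s.getD j ' '] else [s.getD j ' ']) := by
    intro j _
    rw [PySem.List.pyGetD_natCast]
    congr 1
    rw [eq_iff_iff]
    rw [PySem.Int.mod_eq_zero_iff_dvd]
    constructor
    · rintro ⟨hd, hne⟩
      refine ⟨?_, by exact_mod_cast fun h => hne (by exact_mod_cast h)⟩
      have : (width.natAbs : Int) ∣ (j : Int) := (Int.natAbs_dvd).mpr hd
      exact_mod_cast this
    · rintro ⟨hd, hne⟩
      refine ⟨?_, by exact_mod_cast fun h => hne (by exact_mod_cast h)⟩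
      exact (Int.natAbs_dvd).mp (by exact_mod_cast hd)
  rw [List.flatMap_congr hcong]
  -- now a pure Nat-indexed flatMap; relate to procA by induction generalizing the offset
  suffices h : ∀ (t : List Char) (p : Nat),
      (List.range t.length).flatMap
        (fun j => if width.natAbs ∣ (p + j) ∧ p + j ≠ 0 then ['\n', t.getD j ' ']
                  else [t.getD j ' ']) = procA width.natAbs t p by
    have := h s 0
    simpa using this
  intro t
  induction t with
  | nil => simp [procA]
  | cons c u ih =>
      intro p
      rw [List.length_cons, List.range_succ_eq_map, List.flatMap_cons, List.flatMap_map, procA]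
      have htail : List.flatMap
          (fun a => if width.natAbs ∣ p + a.succ ∧ p + a.succ ≠ 0 then ['\n', (c :: u).getD a.succ ' ']
            else [(c :: u).getD a.succ ' ']) (List.range u.length)
          = procA width.natAbs u (p + 1) := by
        rw [← ih (p + 1)]
        apply List.flatMap_congr
        intro j _
        have e : p + (j + 1) = p + 1 + j := by omega
        simp [Nat.succ_eq_add_one, e]
      rw [htail]
      simp

-- B's chunk list equals chunksRec
theorem pyChunks_eq_chunksRec (m : Nat) (hm : 0 < m) (s : List Char) :
    (PySem.List.pyRange 0 (s.length : Int) (m : Int)).map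
      (fun i => PySem.List.slice s (some i) (some (i + (m : Int)))) = chunksRec m hm s := by
  have hmz : (0 : Int) < (m : Int) := by exact_mod_cast hm
  have hslice : ∀ (u : List Char) (a : Nat),
      PySem.List.slice u (some ((0 : Int) + (m : Int) * (a : Int)))
        (some ((0 : Int) + (m : Int) * (a : Int) + (m : Int))) = (u.drop (m * a)).take m := by
    intro u a
    have e1 : (0 : Int) + (m : Int) * (a : Int) = ((m * a : Nat) : Int) := by push_cast; ring
    have e2 : (0 : Int) + (m : Int) * (a : Int) + (m : Int) = ((m * a + m : Nat) : Int) := by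
      push_cast; ring
    rw [e2, e1, PySem.List.slice_natCast]
    congr 1
    omega
  suffices h : ∀ n (t : List Char), t.length ≤ n →
      (PySem.List.pyRange 0 (t.length : Int) (m : Int)).map
        (fun i => PySem.List.slice t (some i) (some (i + (m : Int)))) = chunksRec m hm t from
    h s.length s le_rfl
  intro n
  induction n with
  | zero =>
      intro t ht
      have : t = [] := List.eq_nil_of_length_eq_zero (Nat.le_zero.mp ht)
      subst this
      rw [chunksRec, dif_pos rfl, PySem.List.pyRange_of_pos 0 _ hmz]
      simp
  | succ n ih =>
      intro t ht
      by_cases hnil : t = []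
      · subst hnil
        rw [chunksRec, dif_pos rfl, PySem.List.pyRange_of_pos 0 _ hmz]
        simp
      · have hlen0 : 0 < t.length := List.length_pos_iff.mpr hnil
        rw [chunksRec, dif_neg hnil, PySem.List.pyRange_of_pos 0 (t.length : Int) hmz]
        have hcnt : ((((t.length : Int) - 0 + (m : Int) - 1) / (m : Int))).toNat
            = (t.length - 1) / m + 1 := by
          have e : ((t.length : Int) - 0 + (m : Int) - 1) = ((t.length - 1 + m : Nat) : Int) := by
            push_cast; omega
          rw [e, ← Int.natCast_div, Int.toNat_natCast, Nat.add_div_right _ hm]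
        rw [if_pos (by exact_mod_cast hlen0), hcnt, List.range_succ_eq_map, List.map_cons,
          List.map_cons]
        congr 1
        · rw [hslice t 0]
          simp
        · rw [List.map_map, List.map_map,
            ← ih (t.drop m) (by rw [List.length_drop]; omega),
            PySem.List.pyRange_of_pos 0 ((t.drop m).length : Int) hmz, List.length_drop]
          by_cases hsm : t.length ≤ m
          · have hc0 : (t.length - 1) / m = 0 := Nat.div_eq_of_lt (by omega)
            have hd0 : t.length - m = 0 := by omega
            rw [hc0, hd0]
            simp
          · push_neg at hsm
            have hcnt2 : ((((t.length - m : Nat) : Int) - 0 + (m : Int) - 1) / (m : Int)).toNat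
                = (t.length - 1) / m := by
              have e : (((t.length - m : Nat) : Int) - 0 + (m : Int) - 1)
                  = ((t.length - 1 : Nat) : Int) := by push_cast; omega
              rw [e, ← Int.natCast_div, Int.toNat_natCast]
            rw [if_pos (by exact_mod_cast (show 0 < t.length - m by omega)), hcnt2, List.map_map]
            apply List.map_congr_left
            intro k _
            simp only [Function.comp, Nat.succ_eq_add_one]
            rw [hslice t (k + 1), hslice (t.drop m) k, List.drop_drop]
            congr 2
            ring

-- the whole head-processing pipeline, both sides, for positive width
theorem core (s : List Char) (width : Int) (hw : 0 < width) :
    (PySem.List.pyRange 0 (s.length : Int) 1).foldl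
      (fun acc i =>
        if PySem.Int.mod i width = 0 ∧ i ≠ 0 then
          (acc ++ ['\n']) ++ [PySem.List.pyGetD s i ' ']
        else acc ++ [PySem.List.pyGetD s i ' '])
      [] =
    PySem.Chars.join ['\n']
      ((PySem.List.pyRange 0 (s.length : Int) width).map
        (fun i => PySem.List.slice s (some i) (some (i + width)))) := by
  have hm : 0 < width.natAbs := Int.natAbs_pos.mpr hw.ne'
  have habs : width = (width.natAbs : Int) := (Int.natAbs_of_nonneg hw.le).symm
  rw [loopA_eq_procA s width hw.ne', habs, pyChunks_eq_chunksRec width.natAbs hm s]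
  simp only [Int.natAbs_natCast]
  rw [procA_zero_eq_join width.natAbs hm s]

-- ===== VERDICT (by name: the statement is the Claim_ definition above) =====
theorem strEdgesCMD_spec : Claim_equal_strEdgesCMD := by
  intro board width _ hw
  unfold Spec_strEdgesCMD strEdgesCMD strEdgesCMD_alt
  simp only []
  by_cases hin : PySem.Chars.isIn ['\n'] board.toList = true
  · have hinf : ['\n'] <:+: board.toList := (PySem.Chars.isIn_iff_infix _ _).mp hin
    have hnn : 0 ≤ PySem.Chars.find board.toList ['\n'] :=
      (PySem.Chars.find_nonneg_iff _ _).mpr hinf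
    rw [if_pos hin, if_neg (by simp), if_neg (by omega)]
    rw [core _ width hw]
  · have hinf : ¬ ['\n'] <:+: board.toList := by
      intro h; exact hin ((PySem.Chars.isIn_iff_infix _ _).mpr h)
    have hneg : PySem.Chars.find board.toList ['\n'] = -1 :=
      (PySem.Chars.find_eq_neg_one_iff _ _).mpr hinf
    rw [if_neg hin, if_pos rfl, if_pos (by rw [hneg]; norm_num)]
    rw [core _ width hw]
    simp
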